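-- pv_equiv track=rewrite | github.com/Sisha3342/python_practise | general_python/kr/other_variants/var_4/test.py | longest_streak
-- ===== SOURCE A (Python) =====
-- vowels = 'aeiouy'
--
-- def longest_streak(string):
--     i, max_ = 0, 0
--     length = len(string)
--     while i < length:
--         sum_ = 0
--         while i < length and string[i] in vowels:
--             i += 1
--         while i < length and string[i] not in vowels:
--             sum_ += ord(string[i]) - 96
--             i += 1
--         max_ = max(sum_, max_)
--     return max_
-- ===== SOURCE B (Python) =====
-- def longest_streak(string):
--     # Divide and conquer: each half is summarized as (best interior run sum,
--     # prefix run sum, suffix run sum, total, vowel-free?) and summaries merge.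
--     def solve(lo, hi):
--         if hi - lo == 1:
--             c = string[lo]
--             if c in 'aeiouy':
--                 return (0, 0, 0, 0, False)
--             v = ord(c) - 96
--             return (0, v, v, v, True)
--         mid = (lo + hi) // 2
--         b1, p1, s1, t1, c1 = solve(lo, mid)
--         b2, p2, s2, t2, c2 = solve(mid, hi)
--         best = max(b1, b2)
--         if not c1 and not c2:
--             best = max(best, s1 + p2)
--         pref = t1 + p2 if c1 else p1
--         suf = s1 + t2 if c2 else s2
--         return (best, pref, suf, t1 + t2, c1 and c2)
--     if not string:
--         return 0
--     b, p, s, t, c = solve(0, len(string))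
--     return max(b, p, s, 0)
-- ===== Notes on version B (the rewrite author's own statement) =====
-- stated objective: alternative
-- what changed: A's left-to-right nested index-advancing while loops are replaced by a divide-and-conquer: the string is recursively halved, each segment summarized as (best interior run sum, prefix run sum, suffix run sum, total, vowel-free flag), and summaries are merged; the top-level answer is max(best, prefix, suffix, 0).
import Mathlib
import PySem

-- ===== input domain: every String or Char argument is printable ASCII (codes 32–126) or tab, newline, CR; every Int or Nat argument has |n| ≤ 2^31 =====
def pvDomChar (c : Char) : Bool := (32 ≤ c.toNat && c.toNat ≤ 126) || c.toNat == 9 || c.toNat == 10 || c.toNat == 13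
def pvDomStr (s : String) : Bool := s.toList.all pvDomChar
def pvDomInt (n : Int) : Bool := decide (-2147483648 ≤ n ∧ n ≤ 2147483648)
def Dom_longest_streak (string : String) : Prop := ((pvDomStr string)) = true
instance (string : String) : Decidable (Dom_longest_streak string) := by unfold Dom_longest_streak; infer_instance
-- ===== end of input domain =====

-- B replaces A's nested index-advancing while loops by a divide-and-conquer over string
-- halves merging segment summaries (alternative decomposition, same O(n)-class cost is
-- not claimed either way). Return-value equivalence only.

-- ===== PORT A =====
-- `c in vowels` for vowels = 'aeiouy'
def pvVowel (c : Char) : Bool := "aeiouy".toList.contains c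

-- inner loop 1: while i < length and string[i] in vowels: i += 1
def pvSkipV : List Char → List Char
  | [] => []
  | c :: cs => if pvVowel c then pvSkipV cs else c :: cs

-- inner loop 2: while i < length and string[i] not in vowels: sum_ += ord(string[i]) - 96; i += 1
def pvEatC : List Char → Int → Int × List Char
  | [], s => (s, [])
  | c :: cs, s => if pvVowel c then (s, c :: cs) else pvEatC cs (s + ((c.toNat : Int) - 96))

theorem pvSkipV_len_le (l : List Char) : (pvSkipV l).length ≤ l.length := by
  induction l with
  | nil => simp [pvSkipV]
  | cons c cs ih =>
      simp only [pvSkipV]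
      split
      · exact Nat.le_trans ih (Nat.le_succ _)
      · exact le_rfl

theorem pvEatC_len_le (l : List Char) : ∀ s, ((pvEatC l s).2).length ≤ l.length := by
  induction l with
  | nil => intro s; simp [pvEatC]
  | cons c cs ih =>
      intro s
      simp only [pvEatC]
      split
      · simp
      · exact Nat.le_trans (ih _) (Nat.le_succ _)

theorem pvStep_len_lt (l : List Char) (h : l ≠ []) :
    ((pvEatC (pvSkipV l) 0).2).length < l.length := by
  cases l with
  | nil => exact absurd rfl h
  | cons c cs =>
      simp only [pvSkipV]
      by_cases hv : pvVowel c = true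
      · simp only [hv, if_true]
        exact Nat.lt_succ_of_le (Nat.le_trans (pvEatC_len_le _ _) (pvSkipV_len_le cs))
      · simp [pvEatC, hv]
        exact pvEatC_len_le cs _

-- outer loop: while i < length
def pvLoopA (l : List Char) (m : Int) : Int :=
  if h : l = [] then m
  else
    let p := pvEatC (pvSkipV l) 0
    pvLoopA p.2 (max p.1 m)
termination_by l.length
decreasing_by exact pvStep_len_lt l h

def longest_streak (string : String) : Int := pvLoopA string.toList 0

-- ===== PORT B =====
-- merge of two segment summaries (best, pref, suf, total, vowel-free?);
-- Python's tuple unpacking becomes projections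
def pvCombine (x y : Int × Int × Int × Int × Bool) : Int × Int × Int × Int × Bool :=
  let best0 := max x.1 y.1
  (if !x.2.2.2.2 && !y.2.2.2.2 then max best0 (x.2.2.1 + y.2.1) else best0,
   if x.2.2.2.2 then x.2.2.2.1 + y.2.1 else x.2.1,
   if y.2.2.2.2 then x.2.2.1 + y.2.2.2.1 else y.2.2.1,
   x.2.2.2.1 + y.2.2.2.1,
   x.2.2.2.2 && y.2.2.2.2)

-- solve(lo, hi) on the segment, carried as the sublist itself; [] is never reached
-- from longest_streak_alt (the caller returns 0 on the empty string first)
def pvSolve (l : List Char) : Int × Int × Int × Int × Bool :=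
  match l with
  | [] => (0, 0, 0, 0, true)
  | [c] =>
      if pvVowel c then (0, 0, 0, 0, false)
      else ((0 : Int), (c.toNat : Int) - 96, (c.toNat : Int) - 96, (c.toNat : Int) - 96, true)
  | a :: b :: t =>
      let l' := a :: b :: t
      let m := l'.length / 2
      pvCombine (pvSolve (l'.take m)) (pvSolve (l'.drop m))
termination_by l.length
decreasing_by
  · simp; omega
  · simp; omega

def longest_streak_alt (string : String) : Int :=
  let l := string.toList
  if l = [] then 0
  else
    let r := pvSolve l
    max (max (max r.1 r.2.1) r.2.2.1) 0

-- ===== PRECONDITION & SPEC =====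
def Spec_longest_streak (string : String) (out : Int) : Prop := out = longest_streak_alt string
instance (string : String) (out : Int) : Decidable (Spec_longest_streak string out) := by unfold Spec_longest_streak; infer_instance

-- ===== CLAIM (what is proved, stated in full; the proofs are below) =====
def Claim_equal_longest_streak : Prop := ∀ (string : String), Dom_longest_streak string → Spec_longest_streak string (longest_streak string)

-- ===== LEMMAS AND PROOFS =====

-- getLastD / dropLast helpers
theorem pvGL_cons {α : Type} (x d : α) (t : List α) (h : t ≠ []) :
    (x :: t).getLastD d = t.getLastD d := by
  cases t with
  | nil => exact absurd rfl h
  | cons y ys => simp [List.getLastD]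

theorem pvDL_cons {α : Type} (x : α) (t : List α) (h : t ≠ []) :
    (x :: t).dropLast = x :: t.dropLast := by
  cases t with
  | nil => exact absurd rfl h
  | cons y ys => rfl

theorem pvGL_append {α : Type} (d : α) (u v : List α) (h : v ≠ []) :
    (u ++ v).getLastD d = v.getLastD d := by
  induction u with
  | nil => rfl
  | cons x xs ih => rw [List.cons_append, pvGL_cons _ _ _ (by simp [h]), ih]

theorem pvDL_append {α : Type} (u v : List α) (h : v ≠ []) :
    (u ++ v).dropLast = u ++ v.dropLast := by
  induction u with
  | nil => rfl
  | cons x xs ih => rw [List.cons_append, pvDL_cons _ _ (by simp [h]), ih, List.cons_append]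

theorem pvDL_GL (t : List Int) (d : Int) (h : t ≠ []) :
    t.dropLast ++ [t.getLastD d] = t := by
  induction t with
  | nil => exact absurd rfl h
  | cons x xs ih =>
      cases xs with
      | nil => rfl
      | cons y ys =>
          rw [pvDL_cons _ _ (by simp), pvGL_cons _ _ _ (by simp), List.cons_append,
            ih (by simp)]

theorem pvDL_single {α : Type} (x : α) : ([x] : List α).dropLast = [] := rfl

theorem pvGL_single {α : Type} (x d : α) : ([x] : List α).getLastD d = x := rfl

-- the list of sums of the maximal vowel-free runs of l, the current run already holding cur
def pvRS : List Char → Int → List Int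
  | [], cur => [cur]
  | c :: t, cur => if pvVowel c then cur :: pvRS t 0 else pvRS t (cur + ((c.toNat : Int) - 96))

-- sum of ord(c)-96 over the non-vowel characters
def pvTS (l : List Char) : Int :=
  (l.map (fun c => if pvVowel c then 0 else (c.toNat : Int) - 96)).sum

theorem pvRS_ne_nil (l : List Char) (cur : Int) : pvRS l cur ≠ [] := by
  induction l generalizing cur with
  | nil => simp [pvRS]
  | cons c t ih =>
      simp only [pvRS]
      split
      · simp
      · exact ih _

theorem pvRS_shift (l : List Char) (c : Int) :
    pvRS l c = (c + (pvRS l 0).headD 0) :: (pvRS l 0).tail := by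
  induction l generalizing c with
  | nil => simp [pvRS]
  | cons x t ih =>
      by_cases hv : pvVowel x = true
      · simp [pvRS, hv]
      · simp only [pvRS, hv, Bool.false_eq_true, if_false]
        rw [ih (c + _), ih ((0 : Int) + _)]
        simp [add_assoc]

theorem pvRS_append (l1 l2 : List Char) (cur : Int) :
    pvRS (l1 ++ l2) cur = (pvRS l1 cur).dropLast ++ pvRS l2 ((pvRS l1 cur).getLastD 0) := by
  induction l1 generalizing cur with
  | nil => simp [pvRS]
  | cons c t ih =>
      by_cases hv : pvVowel c = true
      · simp only [List.cons_append, pvRS, hv, if_true]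
        rw [ih 0]
        have hne := pvRS_ne_nil t 0
        rw [pvDL_cons _ _ hne, pvGL_cons _ _ _ hne]
        simp
      · simp only [List.cons_append, pvRS, hv, Bool.false_eq_true, if_false]
        exact ih _

theorem pvRS_len1 (l : List Char) : ∀ cur, (pvRS l cur).length = 1 → pvRS l cur = [cur + pvTS l] := by
  induction l with
  | nil => intro cur _; simp [pvRS, pvTS]
  | cons c t ih =>
      intro cur h
      by_cases hv : pvVowel c = true
      · exfalso
        simp only [pvRS, hv, if_true, List.length_cons] at h
        exact pvRS_ne_nil t 0 (List.eq_nil_of_length_eq_zero (by omega))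
      · simp only [pvRS, hv, Bool.false_eq_true, if_false] at h ⊢
        rw [ih _ h]
        simp [pvTS, hv, add_assoc]

theorem pvTS_append (l1 l2 : List Char) : pvTS (l1 ++ l2) = pvTS l1 + pvTS l2 := by
  simp [pvTS]

-- foldl max
theorem pvFmax (l : List Int) (a b : Int) :
    List.foldl max (max a b) l = max a (List.foldl max b l) := by
  induction l generalizing b with
  | nil => rfl
  | cons x t ih => simp only [List.foldl_cons, max_assoc]; exact ih _

theorem pvM_nonneg (l : List Int) : 0 ≤ List.foldl max 0 l := by
  have : List.foldl max (max 0 0) l = max 0 (List.foldl max 0 l) := pvFmax l 0 0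
  simp at this
  omega

theorem pvM_cons (x : Int) (l : List Int) :
    List.foldl max 0 (x :: l) = max x (List.foldl max 0 l) := by
  simp only [List.foldl_cons]
  have : max 0 x = max x 0 := max_comm _ _
  rw [this, pvFmax]

theorem pvM_append (u v : List Int) :
    List.foldl max 0 (u ++ v) = max (List.foldl max 0 u) (List.foldl max 0 v) := by
  rw [List.foldl_append]
  have h := pvM_nonneg u
  have : List.foldl max 0 u = max (List.foldl max 0 u) 0 := by omega
  rw [this, pvFmax]
  omega

-- the invariant satisfied by pvSolve
theorem pvSolve_inv : ∀ (n : Nat) (l : List Char), l.length ≤ n → l ≠ [] →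
    pvSolve l = (List.foldl max 0 ((pvRS l 0).tail.dropLast),
                 (pvRS l 0).headD 0,
                 (pvRS l 0).getLastD 0,
                 pvTS l,
                 decide ((pvRS l 0).length = 1)) := by
  intro n
  induction n with
  | zero =>
      intro l hl hne
      exact absurd (List.eq_nil_of_length_eq_zero (Nat.le_zero.mp hl)) hne
  | succ n ih =>
      intro l hl hne
      match l with
      | [c] =>
          by_cases hv : pvVowel c = true
          · simp [pvSolve, hv, pvRS, pvTS]
          · simp [pvSolve, hv, pvRS, pvTS]
      | a :: b :: t =>
          rw [pvSolve]
          have hLlen : (a :: b :: t).length = t.length + 2 := by simp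
          have h1ne : ((a :: b :: t).take ((a :: b :: t).length / 2)) ≠ [] := by
            intro h
            have := congrArg List.length h
            rw [List.length_take, hLlen] at this
            simp only [List.length_nil] at this
            omega
          have h2ne : ((a :: b :: t).drop ((a :: b :: t).length / 2)) ≠ [] := by
            intro h
            have := congrArg List.length h
            rw [List.length_drop, hLlen] at this
            simp only [List.length_nil] at this
            omega
          have h1len : ((a :: b :: t).take ((a :: b :: t).length / 2)).length ≤ n := by
            rw [List.length_take, hLlen]
            rw [hLlen] at hl
            omega
          have h2len : ((a :: b :: t).drop ((a :: b :: t).length / 2)).length ≤ n := by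
            rw [List.length_drop, hLlen]
            rw [hLlen] at hl
            omega
          rw [ih _ h1len h1ne, ih _ h2len h2ne]
          have hsplit : (a :: b :: t) =
              ((a :: b :: t).take ((a :: b :: t).length / 2)) ++
              ((a :: b :: t).drop ((a :: b :: t).length / 2)) := (List.take_append_drop _ _).symm
          rw [show pvRS (a :: b :: t) 0 = pvRS (_ ++ _) 0 from by rw [← hsplit]]
          rw [show pvTS (a :: b :: t) = pvTS (_ ++ _) from by rw [← hsplit]]
          generalize ((a :: b :: t).take ((a :: b :: t).length / 2)) = l1 at h1ne
          generalize ((a :: b :: t).drop ((a :: b :: t).length / 2)) = l2 at h2ne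
          clear hsplit hLlen h1len h2len hl hne
          rw [pvRS_append, pvTS_append]
          rw [pvRS_shift l2 ((pvRS l1 0).getLastD 0)]
          have hne1 := pvRS_ne_nil l1 0
          have hne2 := pvRS_ne_nil l2 0
          by_cases hc1 : (pvRS l1 0).length = 1
          · have e1 : pvRS l1 0 = [0 + pvTS l1] := pvRS_len1 l1 0 hc1
            rw [zero_add] at e1
            rw [e1]
            by_cases hc2 : (pvRS l2 0).length = 1
            · have e2 : pvRS l2 0 = [0 + pvTS l2] := pvRS_len1 l2 0 hc2
              rw [zero_add] at e2
              rw [e2]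
              simp [pvCombine]
            · cases hx2 : pvRS l2 0 with
              | nil => exact absurd hx2 hne2
              | cons h2 t2 =>
                rw [hx2] at hc2
                have ht2 : t2 ≠ [] := by
                  intro h; rw [h] at hc2; simp at hc2
                have hflag2 : decide ((h2 :: t2).length = 1) = false := by
                  simp only [decide_eq_false_iff_not]
                  exact hc2
                have hlen2 : ((pvTS l1 + h2) :: t2).length ≠ 1 := by
                  simp only [List.length_cons]
                  intro hh
                  exact ht2 (List.eq_nil_of_length_eq_zero (by omega))
                simp only [pvCombine, hflag2, List.dropLast_nil, List.nil_append,
                  List.headD_cons, List.length_singleton, decide_true,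
                  List.tail_cons, List.foldl_nil, Bool.not_true, Bool.false_and,
                  Bool.true_and, Bool.false_eq_true, if_false, if_true,
                  pvDL_single, pvGL_single, Prod.mk.injEq]
                refine ⟨?_, trivial, ?_, trivial, ?_⟩
                · have := pvM_nonneg (t2.dropLast)
                  omega
                · rw [pvGL_cons h2 _ _ ht2, pvGL_cons _ _ _ ht2]
                · simp [ht2]
          · cases hx1 : pvRS l1 0 with
            | nil => exact absurd hx1 hne1
            | cons h1 t1 =>
              rw [hx1] at hc1
              have ht1 : t1 ≠ [] := by
                intro h; rw [h] at hc1; simp at hc1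
              have hflag1 : decide ((h1 :: t1).length = 1) = false := by
                simp only [decide_eq_false_iff_not]
                exact hc1
              rw [pvDL_cons _ _ ht1, pvGL_cons _ _ _ ht1]
              by_cases hc2 : (pvRS l2 0).length = 1
              · have e2 : pvRS l2 0 = [0 + pvTS l2] := pvRS_len1 l2 0 hc2
                rw [zero_add] at e2
                rw [e2]
                have hneC : t1.dropLast ++ [t1.getLastD 0 + pvTS l2] ≠ [] := by simp
                have hlenC : (h1 :: (t1.dropLast ++ [t1.getLastD 0 + pvTS l2])).length ≠ 1 := by
                  simp
                simp only [pvCombine, hflag1, List.headD_cons, List.length_singleton,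
                  decide_true, List.tail_cons, Bool.not_false, Bool.not_true,
                  Bool.false_and, Bool.and_false, Bool.false_eq_true, if_false, if_true,
                  pvDL_single, pvGL_single, List.cons_append, Prod.mk.injEq]
                refine ⟨?_, trivial, ?_, trivial, ?_⟩
                · rw [List.dropLast_concat]
                  simp only [List.dropLast_nil, List.foldl_nil]
                  have := pvM_nonneg (t1.dropLast)
                  omega
                · rw [pvGL_cons _ _ _ hneC, List.getLastD_concat]
                · simp [hlenC]
              · cases hx2 : pvRS l2 0 with
                | nil => exact absurd hx2 hne2
                | cons h2 t2 =>
                  rw [hx2] at hc2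
                  have ht2 : t2 ≠ [] := by
                    intro h; rw [h] at hc2; simp at hc2
                  have hflag2 : decide ((h2 :: t2).length = 1) = false := by
                    simp only [decide_eq_false_iff_not]
                    exact hc2
                  have hneD : t1.dropLast ++ (t1.getLastD 0 + h2) :: t2 ≠ [] := by simp
                  have hlenD : (h1 :: (t1.dropLast ++ (t1.getLastD 0 + h2) :: t2)).length ≠ 1 := by
                    simp
                  simp only [pvCombine, hflag1, hflag2, List.headD_cons, List.tail_cons,
                    Bool.not_false, Bool.and_self, Bool.false_and, Bool.and_false,
                    Bool.false_eq_true, if_false, if_true, List.cons_append, Prod.mk.injEq]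
                  refine ⟨?_, trivial, ?_, trivial, ?_⟩
                  · rw [pvDL_append _ _ (List.cons_ne_nil _ _), pvDL_cons _ _ ht2,
                      pvM_append, pvM_cons]
                    omega
                  · rw [pvGL_cons h2 _ _ ht2, pvGL_cons _ _ _ hneD,
                      pvGL_append _ _ _ (List.cons_ne_nil _ _), pvGL_cons _ _ _ ht2]
                  · simp [hlenD, ht2]

-- ===== A-side: pvLoopA computes the max of the run sums =====
theorem pvSkipV_rs_fold (l : List Char) : ∀ m : Int, 0 ≤ m →
    (pvRS l 0).foldl max m = (pvRS (pvSkipV l) 0).foldl max m := by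
  induction l with
  | nil => intro m _; rfl
  | cons c t ih =>
      intro m hm
      simp only [pvSkipV, pvRS]
      by_cases hv : pvVowel c = true
      · simp only [hv, if_true, List.foldl_cons]
        rw [max_eq_left hm]
        exact ih m hm
      · simp [hv, pvRS]

theorem pvEatC_rs (l : List Char) : ∀ s0 : Int,
    ((pvEatC l s0).2 = [] ∧ pvRS l s0 = [(pvEatC l s0).1]) ∨
    (∃ v rest, (pvEatC l s0).2 = v :: rest ∧ pvVowel v = true ∧
      pvRS l s0 = (pvEatC l s0).1 :: pvRS rest 0) := by
  induction l with
  | nil => intro s0; left; exact ⟨rfl, rfl⟩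
  | cons c t ih =>
      intro s0
      by_cases hv : pvVowel c = true
      · right
        refine ⟨c, t, ?_, hv, ?_⟩ <;> simp [pvEatC, pvRS, hv]
      · simp only [pvEatC, pvRS, hv]
        simp only [Bool.false_eq_true, if_false]
        exact ih _

theorem pvLoopA_eq_fold : ∀ (n : Nat) (l : List Char) (m : Int), l.length ≤ n → 0 ≤ m →
    pvLoopA l m = (pvRS l 0).foldl max m := by
  intro n
  induction n with
  | zero =>
      intro l m hl hm
      have : l = [] := List.eq_nil_of_length_eq_zero (Nat.le_zero.mp hl)
      subst this
      simp [pvLoopA, pvRS, max_eq_left hm]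
  | succ n ih =>
      intro l m hl hm
      by_cases h : l = []
      · subst h; simp [pvLoopA, pvRS, max_eq_left hm]
      · rw [pvLoopA, dif_neg h]
        show pvLoopA (pvEatC (pvSkipV l) 0).2 (max (pvEatC (pvSkipV l) 0).1 m) = _
        have hlt := pvStep_len_lt l h
        rcases pvEatC_rs (pvSkipV l) 0 with ⟨h2, hrs⟩ | ⟨v, rest, h2, hv, hrs⟩
        · rw [h2, pvLoopA]
          rw [pvSkipV_rs_fold l m hm, hrs]
          simp [max_comm]
        · rw [h2]
          have hrl : (v :: rest).length ≤ n := by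
            have := hlt; rw [h2] at this; omega
          rw [ih (v :: rest) (max (pvEatC (pvSkipV l) 0).1 m) hrl (le_trans hm (le_max_right _ _))]
          rw [pvSkipV_rs_fold l m hm, hrs]
          simp only [List.foldl_cons]
          rw [max_comm m (pvEatC (pvSkipV l) 0).1]
          have h0 : pvRS (v :: rest) 0 = 0 :: pvRS rest 0 := by simp [pvRS, hv]
          rw [h0]
          simp only [List.foldl_cons]
          rw [max_eq_left (le_trans hm (le_max_right _ _))]

-- ===== VERDICT (by name: the statement is the Claim_ definition above) =====
theorem longest_streak_spec : Claim_equal_longest_streak := by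
  intro s _
  unfold Spec_longest_streak longest_streak longest_streak_alt
  rw [pvLoopA_eq_fold s.toList.length s.toList 0 le_rfl le_rfl]
  by_cases h : s.toList = []
  · rw [h]
    simp [pvRS]
  · simp only [h, if_false]
    rw [pvSolve_inv s.toList.length s.toList le_rfl h]
    have hne := pvRS_ne_nil s.toList 0
    cases hrs : pvRS s.toList 0 with
    | nil => exact absurd hrs hne
    | cons x xs =>
      simp only [List.headD_cons, List.tail_cons]
      rw [pvM_cons]
      by_cases hx : xs = []
      · subst hx
        simp
        omega
      · rw [pvGL_cons _ _ _ hx]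
        conv_lhs => rw [show xs = xs.dropLast ++ [xs.getLastD 0] from (pvDL_GL xs 0 hx).symm]
        rw [pvM_append, pvM_cons]
        have := pvM_nonneg xs.dropLast
        simp only [List.foldl_nil]
        omega
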